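-- pv_equiv track=rewrite | github.com/DengBoCong/text-similarity | sim/tools/data_processor/process_oov_data.py | process_oov_record
-- ===== SOURCE A (Python) =====
-- from typing import Any
--
-- def process_oov_record(record: Any,
--                        normal_vocab: dict,
--                        idmap: dict,
--                        min_freq: int = 5,
--                        min_oov_word_idx: int = 35000,
--                        split: str = " ") -> tuple:
--     """将相关的token转换成词频idx
--     :param record: (text_a, text_b, label)
--     :param normal_vocab: 词频dict
--     :param idmap: token idx
--     :param min_freq: 最小保留词频
--     :param min_oov_word_idx: oov起始idx
--     :param split: text文本分隔符
--     """
--     tokens_a = record[0].split(split)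
--     tokens_b = record[1].split(split)
--
--     oov_word_map, cur_oov_idx = {}, min_oov_word_idx
--     for tokens in [tokens_a, tokens_b]:
--         for i in range(len(tokens)):
--             if normal_vocab.get(tokens[i], 0) < min_freq:
--                 if tokens[i] not in oov_word_map:
--                     oov_word_map[tokens[i]] = str(cur_oov_idx)
--                     cur_oov_idx += 1
--                 tokens[i] = oov_word_map[tokens[i]]
--             else:
--                 tokens[i] = idmap[tokens[i]]
--
--     return " ".join(tokens_a), " ".join(tokens_b)
-- ===== SOURCE B (Python) =====
-- def process_oov_record(record, normal_vocab, idmap, min_freq=5, min_oov_word_idx=35000, split=" "):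
--     tokens_a = record[0].split(split)
--     tokens_b = record[1].split(split)
--     oov_word_map = {}
--     cur = min_oov_word_idx
--     for t in tokens_a + tokens_b:
--         if normal_vocab.get(t, 0) < min_freq and t not in oov_word_map:
--             oov_word_map[t] = str(cur)
--             cur += 1
--     out_a = [oov_word_map[t] if t in oov_word_map else idmap[t] for t in tokens_a]
--     out_b = [oov_word_map[t] if t in oov_word_map else idmap[t] for t in tokens_b]
--     return " ".join(out_a), " ".join(out_b)
-- ===== Notes on version B (the rewrite author's own statement) =====
-- stated objective: alternative
-- what changed: A rewrites both token lists in place in a single pass that interleaves OOV-index assignment with substitution; B first builds the OOV table in one pass over tokens_a+tokens_b, then produces the outputs with separate pure mapping passes (comprehensions), never mutating the token lists.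
import Mathlib
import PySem

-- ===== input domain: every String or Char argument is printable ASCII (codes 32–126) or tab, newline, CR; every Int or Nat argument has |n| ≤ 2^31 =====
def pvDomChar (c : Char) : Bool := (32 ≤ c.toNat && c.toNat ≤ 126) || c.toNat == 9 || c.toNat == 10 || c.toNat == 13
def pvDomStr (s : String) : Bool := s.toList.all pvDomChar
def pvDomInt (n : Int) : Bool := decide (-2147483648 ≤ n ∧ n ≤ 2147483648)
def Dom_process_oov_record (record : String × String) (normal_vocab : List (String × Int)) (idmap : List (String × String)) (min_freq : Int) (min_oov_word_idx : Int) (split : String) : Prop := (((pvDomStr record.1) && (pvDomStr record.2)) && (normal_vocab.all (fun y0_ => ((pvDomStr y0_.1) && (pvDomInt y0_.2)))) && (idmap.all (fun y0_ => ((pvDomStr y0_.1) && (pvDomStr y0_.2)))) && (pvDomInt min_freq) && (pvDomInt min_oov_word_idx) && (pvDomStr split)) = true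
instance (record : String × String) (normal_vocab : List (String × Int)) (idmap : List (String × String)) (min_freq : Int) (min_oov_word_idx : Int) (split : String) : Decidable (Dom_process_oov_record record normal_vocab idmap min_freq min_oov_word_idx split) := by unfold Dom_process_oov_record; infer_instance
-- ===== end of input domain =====

-- ===== PORT A =====
-- B separates OOV-table construction from rewriting (two pure passes) instead of A's single
-- in-place pass; same cost, no mutation.  A mutates its local token lists only (not arguments).
-- dict lookups follow the assoc-list convention (first match):
def pvFreq (normal_vocab : List (String × Int)) (t : String) : Int :=
  ((normal_vocab.find? (fun p => p.1 == t)).map Prod.snd).getD 0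

-- idmap[t]: Python raises KeyError when t is absent; Pre_ excludes that, the port defaults to "".
def pvIdval (idmap : List (String × String)) (t : String) : String :=
  ((idmap.find? (fun p => p.1 == t)).map Prod.snd).getD ""

-- one step of A's in-place loop body, state = (rewritten tokens so far, (oov_word_map, cur_oov_idx))
def pvStepA (freq : String → Int) (idval : String → String) (min_freq : Int)
    (acc : List String × PySem.Dict String String × Int) (t : String) :
    List String × PySem.Dict String String × Int :=
  if freq t < min_freq then
    match acc.2.1.get? t with
    | some v => (acc.1 ++ [v], acc.2.1, acc.2.2)
    | none => (acc.1 ++ [PySem.Int.toStr acc.2.2], acc.2.1.insert t (PySem.Int.toStr acc.2.2), acc.2.2 + 1)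
  else
    (acc.1 ++ [idval t], acc.2.1, acc.2.2)

def process_oov_record (record : String × String) (normal_vocab : List (String × Int)) (idmap : List (String × String)) (min_freq : Int) (min_oov_word_idx : Int) (split : String) : String × String :=
  -- record[0].split(split): Python raises ValueError when split = ""; Pre_ excludes that
  let tokens_a := (PySem.Str.split? record.1 split).getD []
  let tokens_b := (PySem.Str.split? record.2 split).getD []
  let s1 := tokens_a.foldl (pvStepA (pvFreq normal_vocab) (pvIdval idmap) min_freq)
              ([], PySem.Dict.empty, min_oov_word_idx)
  let s2 := tokens_b.foldl (pvStepA (pvFreq normal_vocab) (pvIdval idmap) min_freq) ([], s1.2)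
  (PySem.Str.join " " s1.1, PySem.Str.join " " s2.1)

-- ===== PORT B =====
-- one step of B's table-building loop, state = (oov_word_map, cur_oov_idx)
def pvBuildB (freq : String → Int) (min_freq : Int)
    (st : PySem.Dict String String × Int) (t : String) : PySem.Dict String String × Int :=
  if freq t < min_freq ∧ st.1.contains t = false then
    (st.1.insert t (PySem.Int.toStr st.2), st.2 + 1)
  else st

-- B's pure rewrite of one token via the finished table
def pvRewB (idval : String → String) (m : PySem.Dict String String) (t : String) : String :=
  match m.get? t with
  | some v => v
  | none => idval t

def process_oov_record_alt (record : String × String) (normal_vocab : List (String × Int)) (idmap : List (String × String)) (min_freq : Int) (min_oov_word_idx : Int) (split : String) : String × String :=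
  let tokens_a := (PySem.Str.split? record.1 split).getD []
  let tokens_b := (PySem.Str.split? record.2 split).getD []
  let m := ((tokens_a ++ tokens_b).foldl (pvBuildB (pvFreq normal_vocab) min_freq)
              (PySem.Dict.empty, min_oov_word_idx)).1
  (PySem.Str.join " " (tokens_a.map (pvRewB (pvIdval idmap) m)),
   PySem.Str.join " " (tokens_b.map (pvRewB (pvIdval idmap) m)))

-- ===== PRECONDITION & SPEC =====
-- Pre_ excludes exactly the inputs where Python A raises: split = "" (ValueError from str.split)
-- and records containing a token with frequency ≥ min_freq that is missing from idmap (KeyError).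
def Pre_process_oov_record (record : String × String) (normal_vocab : List (String × Int)) (idmap : List (String × String)) (min_freq : Int) (min_oov_word_idx : Int) (split : String) : Prop :=
  split ≠ "" ∧
  ∀ t ∈ (PySem.Str.split? record.1 split).getD [] ++ (PySem.Str.split? record.2 split).getD [],
    ¬ (((normal_vocab.find? (fun p => p.1 == t)).map Prod.snd).getD 0 < min_freq) →
      (idmap.find? (fun p => p.1 == t)).isSome = true
instance (record : String × String) (normal_vocab : List (String × Int)) (idmap : List (String × String)) (min_freq : Int) (min_oov_word_idx : Int) (split : String) : Decidable (Pre_process_oov_record record normal_vocab idmap min_freq min_oov_word_idx split) := by unfold Pre_process_oov_record; infer_instance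

def pvWitness_process_oov_record : (String × String) × (List (String × Int)) × (List (String × String)) × Int × Int × String :=
  (("a b", "a"), [("a", 10)], [("a", "1")], 5, 35000, " ")

def Spec_process_oov_record (record : String × String) (normal_vocab : List (String × Int)) (idmap : List (String × String)) (min_freq : Int) (min_oov_word_idx : Int) (split : String) (out : String × String) : Prop := out = process_oov_record_alt record normal_vocab idmap min_freq min_oov_word_idx split
instance (record : String × String) (normal_vocab : List (String × Int)) (idmap : List (String × String)) (min_freq : Int) (min_oov_word_idx : Int) (split : String) (out : String × String) : Decidable (Spec_process_oov_record record normal_vocab idmap min_freq min_oov_word_idx split out) := by unfold Spec_process_oov_record; infer_instance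

-- ===== CLAIM (what is proved, stated in full; the proofs are below) =====
def Claim_equal_process_oov_record : Prop := ∀ (record : String × String) (normal_vocab : List (String × Int)) (idmap : List (String × String)) (min_freq : Int) (min_oov_word_idx : Int) (split : String), Dom_process_oov_record record normal_vocab idmap min_freq min_oov_word_idx split → Pre_process_oov_record record normal_vocab idmap min_freq min_oov_word_idx split → Spec_process_oov_record record normal_vocab idmap min_freq min_oov_word_idx split (process_oov_record record normal_vocab idmap min_freq min_oov_word_idx split)

-- ===== LEMMAS AND PROOFS =====

-- one A-step leaves the same (map, idx) state as one B-build-step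
theorem pvStep_state (freq : String → Int) (idval : String → String) (mf : Int)
    (acc : List String × PySem.Dict String String × Int) (t : String) :
    (pvStepA freq idval mf acc t).2 = pvBuildB freq mf acc.2 t := by
  unfold pvStepA pvBuildB
  by_cases h : freq t < mf
  · cases hm : acc.2.1.get? t with
    | some v =>
      have hc : acc.2.1.contains t = true := by
        rw [PySem.Dict.contains_eq_isSome_get?, hm]; rfl
      simp [h, hm, hc]
    | none =>
      have hc : acc.2.1.contains t = false := by
        rw [PySem.Dict.contains_eq_isSome_get?, hm]; rfl
      simp [h, hm, hc]
  · simp [h]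

theorem pvFold_state (freq : String → Int) (idval : String → String) (mf : Int) :
    ∀ (ts : List String) (acc : List String × PySem.Dict String String × Int),
      (ts.foldl (pvStepA freq idval mf) acc).2 = ts.foldl (pvBuildB freq mf) acc.2 := by
  intro ts
  induction ts with
  | nil => intro acc; rfl
  | cons t ts ih =>
      intro acc
      simp only [List.foldl_cons, ih, pvStep_state]

-- bindings of the OOV map survive the rest of the build loop (keys are inserted at most once)
theorem pvBuild_mono (freq : String → Int) (mf : Int) :
    ∀ (ts : List String) (st : PySem.Dict String String × Int) (t : String) (v : String),
      st.1.get? t = some v → ((ts.foldl (pvBuildB freq mf) st).1).get? t = some v := by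
  intro ts
  induction ts with
  | nil => intro st t v h; exact h
  | cons u ts ih =>
      intro st t v h
      simp only [List.foldl_cons]
      apply ih
      unfold pvBuildB
      by_cases hc : freq u < mf ∧ st.1.contains u = false
      · rw [if_pos hc]
        have hne : t ≠ u := by
          intro he; subst he
          rw [PySem.Dict.contains_eq_isSome_get?, h] at hc
          exact absurd hc.2 (by simp)
        exact (PySem.Dict.get?_insert_of_ne _ _ hne).trans h
      · rw [if_neg hc]; exact h

-- tokens of frequency ≥ min_freq never enter the OOV map
theorem pvBuild_none (freq : String → Int) (mf : Int) :
    ∀ (ts : List String) (st : PySem.Dict String String × Int) (t : String),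
      ¬ (freq t < mf) → st.1.get? t = none → ((ts.foldl (pvBuildB freq mf) st).1).get? t = none := by
  intro ts
  induction ts with
  | nil => intro st t _ h; exact h
  | cons u ts ih =>
      intro st t hf h
      simp only [List.foldl_cons]
      apply ih _ _ hf
      unfold pvBuildB
      by_cases hc : freq u < mf ∧ st.1.contains u = false
      · rw [if_pos hc]
        have hne : t ≠ u := by
          intro he; subst he; exact hf hc.1
        exact (PySem.Dict.get?_insert_of_ne _ _ hne).trans h
      · rw [if_neg hc]; exact h

-- A's rewritten tokens are B's pure rewrite through any map M extending the final build state
theorem pvFold_out (freq : String → Int) (idval : String → String) (mf : Int) :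
    ∀ (ts : List String) (acc : List String × PySem.Dict String String × Int)
      (M : PySem.Dict String String),
      (∀ t v, ((ts.foldl (pvBuildB freq mf) acc.2).1).get? t = some v → M.get? t = some v) →
      (∀ t, ¬ (freq t < mf) → M.get? t = none) →
      (ts.foldl (pvStepA freq idval mf) acc).1 = acc.1 ++ ts.map (pvRewB idval M) := by
  intro ts
  induction ts with
  | nil => intro acc M _ _; simp
  | cons t ts ih =>
      intro acc M h1 h2
      simp only [List.foldl_cons] at h1 ⊢
      have hstep : (pvStepA freq idval mf acc t).2 = pvBuildB freq mf acc.2 t :=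
        pvStep_state freq idval mf acc t
      have h1' : ∀ u v,
          ((ts.foldl (pvBuildB freq mf) (pvStepA freq idval mf acc t).2).1).get? u = some v →
          M.get? u = some v := by
        intro u v hu; exact h1 u v (by rw [hstep] at hu; exact hu)
      have hrec := ih (pvStepA freq idval mf acc t) M h1' h2
      rw [hrec]
      have hhead : (pvStepA freq idval mf acc t).1 = acc.1 ++ [pvRewB idval M t] := by
        unfold pvStepA
        by_cases h : freq t < mf
        · cases hm : acc.2.1.get? t with
          | some v =>
            have hMt : M.get? t = some v := by
              apply h1 t v
              have : pvBuildB freq mf acc.2 t = acc.2 := by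
                unfold pvBuildB
                have hc : acc.2.1.contains t = true := by
                  rw [PySem.Dict.contains_eq_isSome_get?, hm]; rfl
                simp [hc]
              rw [this]
              exact pvBuild_mono freq mf ts acc.2 t v hm
            simp [h, hm, pvRewB, hMt]
          | none =>
            have hMt : M.get? t = some (PySem.Int.toStr acc.2.2) := by
              apply h1 t _
              have hc : acc.2.1.contains t = false := by
                rw [PySem.Dict.contains_eq_isSome_get?, hm]; rfl
              have hb : pvBuildB freq mf acc.2 t =
                  (acc.2.1.insert t (PySem.Int.toStr acc.2.2), acc.2.2 + 1) := by
                unfold pvBuildB; simp [h, hc]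
              rw [hb]
              exact pvBuild_mono freq mf ts _ t _ (PySem.Dict.get?_insert_self _ _ _)
            simp [h, hm, pvRewB, hMt]
        · have hMt : M.get? t = none := h2 t h
          simp [h, pvRewB, hMt]
      rw [hhead, List.map_cons, List.append_assoc]
      rfl

-- ===== VERDICT (by name: the statement is the Claim_ definition above) =====
theorem process_oov_record_spec : Claim_equal_process_oov_record := by
  intro record normal_vocab idmap min_freq min_oov_word_idx split _ _
  unfold Spec_process_oov_record process_oov_record process_oov_record_alt
  set freq := pvFreq normal_vocab with hfreq
  set idval := pvIdval idmap with hidval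
  set ta := (PySem.Str.split? record.1 split).getD [] with hta
  set tb := (PySem.Str.split? record.2 split).getD [] with htb
  set M := ((ta ++ tb).foldl (pvBuildB freq min_freq) (PySem.Dict.empty, min_oov_word_idx)).1 with hM
  have hMnone : ∀ t, ¬ (freq t < min_freq) → M.get? t = none := by
    intro t ht
    exact pvBuild_none freq min_freq (ta ++ tb) _ t ht (PySem.Dict.get?_empty t)
  have hMsplit : (ta ++ tb).foldl (pvBuildB freq min_freq) (PySem.Dict.empty, min_oov_word_idx)
      = tb.foldl (pvBuildB freq min_freq)
          (ta.foldl (pvBuildB freq min_freq) (PySem.Dict.empty, min_oov_word_idx)) :=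
    List.foldl_append
  have houtA : (ta.foldl (pvStepA freq idval min_freq) ([], PySem.Dict.empty, min_oov_word_idx)).1
      = ta.map (pvRewB idval M) := by
    have := pvFold_out freq idval min_freq ta ([], PySem.Dict.empty, min_oov_word_idx) M
      (by
        intro t v h
        rw [hM, hMsplit]
        exact pvBuild_mono freq min_freq tb _ t v h)
      hMnone
    simpa using this
  have hst : (ta.foldl (pvStepA freq idval min_freq) ([], PySem.Dict.empty, min_oov_word_idx)).2
      = ta.foldl (pvBuildB freq min_freq) (PySem.Dict.empty, min_oov_word_idx) :=
    pvFold_state freq idval min_freq ta _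
  have houtB : (tb.foldl (pvStepA freq idval min_freq)
        ([], (ta.foldl (pvStepA freq idval min_freq) ([], PySem.Dict.empty, min_oov_word_idx)).2)).1
      = tb.map (pvRewB idval M) := by
    have := pvFold_out freq idval min_freq tb
      ([], (ta.foldl (pvStepA freq idval min_freq) ([], PySem.Dict.empty, min_oov_word_idx)).2) M
      (by
        intro t v h
        rw [hM, hMsplit]
        simp only [hst] at h
        exact h)
      hMnone
    simpa using this
  simp only [houtA, houtB]
  rfl
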